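-- pv_equiv track=rewrite | github.com/yfp16/WeChat | FS_handler_final.py | pcap_len_distribution
-- ===== SOURCE A (Python) =====
-- def pcap_len_distribution(packet):
--     len_dis = [0, 0, 0, 0, 0] # [0-128, 129-256, 257-512, 513-1024, 1025-]
--     for pac in packet:
--         if pac <= 128:
--             len_dis[0] += 1
--         elif pac <= 256:
--             len_dis[1] += 1
--         elif pac <= 512:
--             len_dis[2] += 1
--         elif pac <= 1024:
--             len_dis[3] += 1
--         else:
--             len_dis[4] += 1
--     return str(len_dis[0]) + ',' + str(len_dis[1]) + ',' + str(len_dis[2]) + ',' + \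
--             str(len_dis[3]) + ',' + str(len_dis[4])
-- ===== SOURCE B (Python) =====
-- def pcap_len_distribution(packet):
--     # Cumulative threshold counts, then adjacent differences -- no per-packet branch cascade.
--     cum = [sum(1 for p in packet if p <= b) for b in (128, 256, 512, 1024)]
--     cum.append(len(packet))
--     counts = [cum[0]] + [cum[i] - cum[i - 1] for i in range(1, 5)]
--     return ','.join(map(str, counts))
-- ===== Notes on version B (the rewrite author's own statement) =====
-- stated objective: alternative
-- what changed: Replaces the single pass with an if/elif cascade and a mutable 5-cell table by four independent cumulative threshold counts (count of lengths <= 128/256/512/1024) whose adjacent differences give the bins.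
import Mathlib
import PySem

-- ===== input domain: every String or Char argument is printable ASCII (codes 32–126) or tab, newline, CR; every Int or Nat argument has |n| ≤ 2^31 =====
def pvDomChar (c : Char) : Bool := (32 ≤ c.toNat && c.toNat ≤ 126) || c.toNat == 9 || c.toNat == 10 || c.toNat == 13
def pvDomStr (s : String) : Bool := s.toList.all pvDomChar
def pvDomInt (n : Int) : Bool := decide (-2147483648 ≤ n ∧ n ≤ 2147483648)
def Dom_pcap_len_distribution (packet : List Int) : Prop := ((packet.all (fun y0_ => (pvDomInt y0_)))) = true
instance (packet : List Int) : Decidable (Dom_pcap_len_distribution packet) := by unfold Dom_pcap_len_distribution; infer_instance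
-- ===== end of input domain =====

-- B replaces A's single-pass if/elif cascade by four cumulative threshold counts and adjacent differences (objective: alternative; return value only).
-- ===== PORT A =====
def pcap_len_distribution (packet : List Int) : String :=
  let len_dis := packet.foldl (fun (s : Int × Int × Int × Int × Int) (pac : Int) =>
    let (a, b, c, d, e) := s
    if pac ≤ 128 then (a + 1, b, c, d, e)
    else if pac ≤ 256 then (a, b + 1, c, d, e)
    else if pac ≤ 512 then (a, b, c + 1, d, e)
    else if pac ≤ 1024 then (a, b, c, d + 1, e)
    else (a, b, c, d, e + 1)) ((0, 0, 0, 0, 0) : Int × Int × Int × Int × Int)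
  PySem.Int.toStr len_dis.1 ++ "," ++ PySem.Int.toStr len_dis.2.1 ++ "," ++
    PySem.Int.toStr len_dis.2.2.1 ++ "," ++ PySem.Int.toStr len_dis.2.2.2.1 ++ "," ++
    PySem.Int.toStr len_dis.2.2.2.2

-- ===== PORT B =====
-- sum(1 for p in packet if p <= b) is ported as the corresponding foldl over the list.
def pcap_len_distribution_alt (packet : List Int) : String :=
  let cum : List Int :=
    (([128, 256, 512, 1024] : List Int).map
      (fun b => packet.foldl (fun acc p => if p ≤ b then acc + 1 else acc) (0 : Int)))
    ++ [(packet.length : Int)]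
  let counts : List Int :=
    [cum.getD 0 0] ++ (PySem.List.pyRange 1 5 1).map
      (fun i => PySem.List.pyGetD cum i 0 - PySem.List.pyGetD cum (i - 1) 0)
  PySem.Str.join "," (counts.map PySem.Int.toStr)

-- ===== PRECONDITION & SPEC =====
def Spec_pcap_len_distribution (packet : List Int) (out : String) : Prop := out = pcap_len_distribution_alt packet
instance (packet : List Int) (out : String) : Decidable (Spec_pcap_len_distribution packet out) := by unfold Spec_pcap_len_distribution; infer_instance

-- ===== CLAIM (what is proved, stated in full; the proofs are below) =====
def Claim_equal_pcap_len_distribution : Prop := ∀ (packet : List Int), Dom_pcap_len_distribution packet → Spec_pcap_len_distribution packet (pcap_len_distribution packet)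

-- ===== LEMMAS AND PROOFS =====



-- number of elements ≤ b, as an Int
def pvCnt (b : Int) (l : List Int) : Int := (l.countP (fun p => decide (p ≤ b)) : Int)

theorem pvCnt_cons (b x : Int) (xs : List Int) :
    pvCnt b (x :: xs) = pvCnt b xs + (if x ≤ b then 1 else 0) := by
  simp only [pvCnt, List.countP_cons, decide_eq_true_eq]
  split_ifs <;> push_cast <;> ring

theorem pvLoop_eq (l : List Int) (a b c d e : Int) :
    l.foldl (fun (s : Int × Int × Int × Int × Int) (pac : Int) =>
      let (a, b, c, d, e) := s
      if pac ≤ 128 then (a + 1, b, c, d, e)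
      else if pac ≤ 256 then (a, b + 1, c, d, e)
      else if pac ≤ 512 then (a, b, c + 1, d, e)
      else if pac ≤ 1024 then (a, b, c, d + 1, e)
      else (a, b, c, d, e + 1)) (a, b, c, d, e) =
    (a + pvCnt 128 l, b + (pvCnt 256 l - pvCnt 128 l), c + (pvCnt 512 l - pvCnt 256 l),
      d + (pvCnt 1024 l - pvCnt 512 l), e + ((l.length : Int) - pvCnt 1024 l)) := by
  induction l generalizing a b c d e with
  | nil => simp [pvCnt]
  | cons x xs ih =>
    simp only [List.foldl_cons]
    split_ifs with h1 h2 h3 h4 <;>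
      · rw [ih]
        simp only [pvCnt_cons, Prod.mk.injEq, List.length_cons]
        refine ⟨?_, ?_, ?_, ?_, ?_⟩ <;> (split_ifs <;> push_cast <;> omega)

theorem pvJoin5 (s1 s2 s3 s4 s5 : String) :
    PySem.Str.join "," [s1, s2, s3, s4, s5] =
      s1 ++ "," ++ s2 ++ "," ++ s3 ++ "," ++ s4 ++ "," ++ s5 := by
  have h : (PySem.Str.join "," [s1, s2, s3, s4, s5]).toList =
      (s1 ++ "," ++ s2 ++ "," ++ s3 ++ "," ++ s4 ++ "," ++ s5).toList := by
    simp [PySem.Str.join, PySem.Chars.join, List.intercalate, List.intersperse]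
  exact String.toList_inj.mp h

theorem pvAlt_eq (packet : List Int) :
    pcap_len_distribution_alt packet =
      PySem.Int.toStr (pvCnt 128 packet) ++ "," ++
      PySem.Int.toStr (pvCnt 256 packet - pvCnt 128 packet) ++ "," ++
      PySem.Int.toStr (pvCnt 512 packet - pvCnt 256 packet) ++ "," ++
      PySem.Int.toStr (pvCnt 1024 packet - pvCnt 512 packet) ++ "," ++
      PySem.Int.toStr ((packet.length : Int) - pvCnt 1024 packet) := by
  unfold pcap_len_distribution_alt
  have hr : PySem.List.pyRange 1 5 1 = [1, 2, 3, 4] := by decide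
  have hf : ∀ b : Int, packet.foldl (fun acc p => if p ≤ b then acc + 1 else acc) (0 : Int)
      = pvCnt b packet := by
    intro b
    simpa [pvCnt] using PySem.List.foldl_if_add_one (fun p => decide (p ≤ b)) packet 0
  simp only [hr, List.map_cons, List.map_nil, List.cons_append, List.nil_append, hf]
  simp only [PySem.List.pyGetD, List.getD]
  rw [pvJoin5]
  norm_num [Int.toNat]

-- ===== VERDICT =====
theorem pcap_len_distribution_spec : Claim_equal_pcap_len_distribution := by
  intro packet _
  unfold Spec_pcap_len_distribution
  rw [pvAlt_eq]
  unfold pcap_len_distribution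
  rw [pvLoop_eq]
  norm_num
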